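-- pv_equiv track=rewrite | github.com/rohandutta08/gandhar_oil | framework/business/recon/__init__.py | get_tax_diff_key
-- ===== SOURCE A (Python) =====
-- def get_tax_diff_key(tax_diff):
--     tax_diff_ranges = {
--         0: 0,
--         1: 1,
--         10: 2,
--         100: 3,
--         1000: 4,
--         10000: 5,
--         100000: 6
--     }
--
--     for diff_range, key in tax_diff_ranges.items():
--         if tax_diff < diff_range:
--             return key
--     return 7
-- ===== SOURCE B (Python) =====
-- import bisect
--
-- _THRESHOLDS = [0, 1, 10, 100, 1000, 10000, 100000]
--
-- def get_tax_diff_key(tax_diff):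
--     return bisect.bisect_right(_THRESHOLDS, tax_diff)
-- ===== Notes on version B (the rewrite author's own statement) =====
-- stated objective: idiomatic
-- what changed: Replaced the first-match linear scan over a dict of thresholds with bisect.bisect_right on a sorted threshold list (binary search for the insertion point).
import Mathlib
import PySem

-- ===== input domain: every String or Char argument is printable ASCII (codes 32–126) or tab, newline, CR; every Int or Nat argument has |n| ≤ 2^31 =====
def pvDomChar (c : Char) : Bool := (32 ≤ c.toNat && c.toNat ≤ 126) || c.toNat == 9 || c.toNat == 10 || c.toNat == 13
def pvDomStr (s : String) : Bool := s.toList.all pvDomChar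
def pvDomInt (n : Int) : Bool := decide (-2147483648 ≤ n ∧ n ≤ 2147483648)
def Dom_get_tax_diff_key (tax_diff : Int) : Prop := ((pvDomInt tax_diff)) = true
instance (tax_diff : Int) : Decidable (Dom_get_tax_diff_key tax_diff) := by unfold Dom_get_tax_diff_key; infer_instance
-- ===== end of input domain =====

-- B replaces A's first-match linear scan over dict items with bisect_right binary search
-- on a sorted threshold list (objective: idiomatic).

-- ===== PORT A =====
-- the dict literal, as an insertion-ordered association list
def pvRanges_get_tax_diff_key : List (Int × Int) :=
  [(0, 0), (1, 1), (10, 2), (100, 3), (1000, 4), (10000, 5), (100000, 6)]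

-- the for-loop with early return: first key whose range exceeds tax_diff, else 7
def pvScan_get_tax_diff_key (tax_diff : Int) : List (Int × Int) → Int
  | [] => 7
  | (diff_range, key) :: rest =>
      if tax_diff < diff_range then key else pvScan_get_tax_diff_key tax_diff rest

def get_tax_diff_key (tax_diff : Int) : Int :=
  pvScan_get_tax_diff_key tax_diff pvRanges_get_tax_diff_key

-- ===== PORT B =====
def pvThresholds_get_tax_diff_key : List Int := [0, 1, 10, 100, 1000, 10000, 100000]

-- bisect.bisect_right: binary search for the insertion point keeping xs sorted,
-- placing x after equal elements
def pvBisectRight_get_tax_diff_key (xs : List Int) (x : Int) (lo hi : Nat) : Nat :=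
  if _h : lo < hi then
    let mid := (lo + hi) / 2
    if x < xs.getD mid 0 then pvBisectRight_get_tax_diff_key xs x lo mid
    else pvBisectRight_get_tax_diff_key xs x (mid + 1) hi
  else lo
termination_by hi - lo
decreasing_by all_goals omega

def get_tax_diff_key_alt (tax_diff : Int) : Int :=
  (pvBisectRight_get_tax_diff_key pvThresholds_get_tax_diff_key tax_diff 0
    pvThresholds_get_tax_diff_key.length : Int)

-- ===== PRECONDITION & SPEC =====
def Spec_get_tax_diff_key (tax_diff : Int) (out : Int) : Prop := out = get_tax_diff_key_alt tax_diff
instance (tax_diff : Int) (out : Int) : Decidable (Spec_get_tax_diff_key tax_diff out) := by unfold Spec_get_tax_diff_key; infer_instance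

-- ===== CLAIM (what is proved, stated in full; the proofs are below) =====
def Claim_equal_get_tax_diff_key : Prop := ∀ (tax_diff : Int), Dom_get_tax_diff_key tax_diff → Spec_get_tax_diff_key tax_diff (get_tax_diff_key tax_diff)

-- ===== LEMMAS AND PROOFS =====
theorem pvBisect_step (xs : List Int) (x : Int) (lo hi : Nat) (h : lo < hi) :
    pvBisectRight_get_tax_diff_key xs x lo hi =
      if x < xs.getD ((lo + hi) / 2) 0 then
        pvBisectRight_get_tax_diff_key xs x lo ((lo + hi) / 2)
      else pvBisectRight_get_tax_diff_key xs x ((lo + hi) / 2 + 1) hi := by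
  rw [pvBisectRight_get_tax_diff_key]; simp [h]

theorem pvBisect_stop (xs : List Int) (x : Int) (lo : Nat) :
    pvBisectRight_get_tax_diff_key xs x lo lo = lo := by
  rw [pvBisectRight_get_tax_diff_key]; simp

-- ===== VERDICT (by name: the statement is the Claim_ definition above) =====
theorem get_tax_diff_key_spec : Claim_equal_get_tax_diff_key := by
  intro t _
  unfold Spec_get_tax_diff_key get_tax_diff_key get_tax_diff_key_alt
  simp only [pvScan_get_tax_diff_key, pvRanges_get_tax_diff_key,
    pvThresholds_get_tax_diff_key, List.length]
  simp only [pvBisect_step, pvBisect_stop, Nat.reduceAdd, Nat.reduceDiv, List.getD_cons_succ, List.getD_cons_zero, show (0:Nat) < 7 by decide, show (0:Nat) < 3 by decide,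
    show (0:Nat) < 1 by decide, show (2:Nat) < 3 by decide, show (4:Nat) < 7 by decide,
    show (4:Nat) < 5 by decide, show (6:Nat) < 7 by decide]
  split_ifs <;> omega
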